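-- pv_equiv track=rewrite | github.com/thewaxmango/cp-scripts | data-structs/Segment_Tree_2D.py | build
-- ===== SOURCE A (Python) =====
-- def build(in_arr):
--     cols, rows = len(in_arr[0]), len(in_arr)
--     seg_arr = [[None]*cols*2 for _ in range(rows*2)]
--
--     # insert initial values
--     for ri, rf in enumerate(range(rows, rows*2)):
--         for ci, cf in enumerate(range(cols, cols*2)):
--             seg_arr[rf][cf] = in_arr[ri][ci]
--
--     # propagate horizontally
--     for r in range(rows, 2*rows):
--         for c in range(cols-1, 0, -1):
--             seg_arr[r][c] = seg_arr[r][c<<1] + seg_arr[r][c<<1|1]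
--
--     # propagate vertically
--     for c in range(cols*2-1, 0, -1):
--         for r in range(rows-1, 0, -1):
--             seg_arr[r][c] = seg_arr[r<<1][c] + seg_arr[r<<1|1][c]
--
--     return seg_arr
-- ===== SOURCE B (Python) =====
-- def build(in_arr):
--     rows, cols = len(in_arr), len(in_arr[0])
--
--     def cell(r, c):
--         # value of the 2D segment tree at node (r, c), computed top-down
--         if r == 0 or c == 0:
--             return None
--         if r >= rows:
--             if c >= cols:
--                 return in_arr[r - rows][c - cols]
--             return cell(r, c << 1) + cell(r, c << 1 | 1)
--         return cell(r << 1, c) + cell(r << 1 | 1, c)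
--
--     return [[cell(r, c) for c in range(2 * cols)] for r in range(2 * rows)]
-- ===== Notes on version B (the rewrite author's own statement) =====
-- stated objective: alternative
-- what changed: A fills a mutable (2*rows)x(2*cols) table in three imperative passes (leaf insertion, horizontal propagation, vertical propagation); B instead defines each node's value by a top-down recursion (leaf / horizontal child sum / vertical child sum) and materialises the whole table in a single comprehension, trading A's in-place sharing of child values for recomputation, so B is slower on large inputs.
import Mathlib
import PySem

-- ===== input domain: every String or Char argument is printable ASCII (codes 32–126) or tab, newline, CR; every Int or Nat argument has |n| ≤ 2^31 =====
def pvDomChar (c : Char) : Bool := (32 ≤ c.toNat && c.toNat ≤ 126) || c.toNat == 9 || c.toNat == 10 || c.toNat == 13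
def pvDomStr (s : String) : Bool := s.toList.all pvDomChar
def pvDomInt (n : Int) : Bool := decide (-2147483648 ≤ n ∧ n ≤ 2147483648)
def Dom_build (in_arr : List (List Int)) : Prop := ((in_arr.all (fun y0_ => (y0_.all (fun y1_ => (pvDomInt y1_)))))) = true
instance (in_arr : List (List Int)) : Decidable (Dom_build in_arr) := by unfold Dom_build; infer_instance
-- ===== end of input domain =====

-- B replaces A's three imperative passes over a mutable 2*rows x 2*cols table by a
-- top-down recursive definition of each node's value, materialised in one comprehension
-- (objective: alternative decomposition; B recomputes child values instead of sharing
-- them in a table, so it is not faster).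

-- ===== PORT A =====
-- A mutable table cell access/update: Python's `seg_arr[r][c]` read and `seg_arr[r][c] = v`
-- (all indices used by A are nonnegative and in range on Pre_, so getD/set are exact there).
abbrev Tbl := List (List (Option Int))

def get2 (t : Tbl) (r c : Nat) : Option Int := (t.getD r []).getD c none

def set2 (t : Tbl) (r c : Nat) (v : Option Int) : Tbl :=
  t.set r ((t.getD r []).set c v)

-- Python's `x + y` on two tree-node values (always two ints on Pre_; none = unreachable TypeError).
def addO : Option Int → Option Int → Option Int
  | some a, some b => some (a + b)
  | _, _ => none

-- `in_arr[i][j]` for indices that are in range on Pre_.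
def aget (in_arr : List (List Int)) (i j : Nat) : Int := (in_arr.getD i []).getD j 0

-- Python's `range(k, 0, -1)` = [k, k-1, …, 1].
def revRange (k : Nat) : List Nat := (List.range k).reverse.map (· + 1)

-- inner loop of A's leaf-insertion pass (row ri)
def segStep1 (in_arr : List (List Int)) (rows cols ri : Nat) (t : Tbl) : Tbl :=
  (List.range cols).foldl (fun t ci => set2 t (rows + ri) (cols + ci) (some (aget in_arr ri ci))) t

-- inner loop of A's horizontal pass (row r)
def segStep2 (cols r : Nat) (t : Tbl) : Tbl :=
  (revRange (cols - 1)).foldl (fun t c => set2 t r c (addO (get2 t r (2*c)) (get2 t r (2*c+1)))) t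

-- inner loop of A's vertical pass (column c)
def segStep3 (rows c : Nat) (t : Tbl) : Tbl :=
  (revRange (rows - 1)).foldl (fun t r => set2 t r c (addO (get2 t (2*r) c) (get2 t (2*r+1) c))) t

def build (in_arr : List (List Int)) : List (List (Option Int)) :=
  let cols := (in_arr.headD []).length   -- len(in_arr[0]); [] is excluded by Pre_
  let rows := in_arr.length
  let seg0 : Tbl := List.replicate (rows*2) (List.replicate (cols*2) (none : Option Int))
  -- insert initial values
  let seg1 := (List.range rows).foldl (fun t ri => segStep1 in_arr rows cols ri t) seg0
  -- propagate horizontally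
  let seg2 := (List.range rows).foldl (fun t i => segStep2 cols (rows + i) t) seg1
  -- propagate vertically
  (revRange (cols*2 - 1)).foldl (fun t c => segStep3 rows c t) seg2

-- ===== PORT B =====
-- value of the 2D segment tree at node (r, c), computed top-down (B's `cell`)
def cellB (rows cols : Nat) (in_arr : List (List Int)) (r c : Nat) : Option Int :=
  if r = 0 ∨ c = 0 then none
  else if rows ≤ r then
    if cols ≤ c then some (aget in_arr (r - rows) (c - cols))
    else addO (cellB rows cols in_arr r (2*c)) (cellB rows cols in_arr r (2*c+1))
  else addO (cellB rows cols in_arr (2*r) c) (cellB rows cols in_arr (2*r+1) c)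
termination_by ((2*rows) - r, (2*cols) - c)
decreasing_by all_goals first
  | (apply Prod.Lex.right; omega)
  | (apply Prod.Lex.left; omega)

def build_alt (in_arr : List (List Int)) : List (List (Option Int)) :=
  let rows := in_arr.length
  let cols := (in_arr.headD []).length
  (List.range (2*rows)).map (fun r => (List.range (2*cols)).map (fun c => cellB rows cols in_arr r c))

-- ===== PRECONDITION & SPEC =====
-- Pre_ excludes exactly the inputs on which A raises: the empty matrix (IndexError on
-- in_arr[0]) and matrices with a row shorter than row 0 (IndexError in the leaf pass).
def Pre_build (in_arr : List (List Int)) : Prop :=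
  in_arr ≠ [] ∧ ∀ row ∈ in_arr, (in_arr.headD []).length ≤ row.length
instance (in_arr : List (List Int)) : Decidable (Pre_build in_arr) := by unfold Pre_build; infer_instance
def pvWitness_build : List (List Int) := [[1, 2], [3, 4]]
def Spec_build (in_arr : List (List Int)) (out : List (List (Option Int))) : Prop := out = build_alt in_arr
instance (in_arr : List (List Int)) (out : List (List (Option Int))) : Decidable (Spec_build in_arr out) := by unfold Spec_build; infer_instance

-- ===== CLAIM (what is proved, stated in full; the proofs are below) =====
def Claim_equal_build : Prop := ∀ (in_arr : List (List Int)), Dom_build in_arr → Pre_build in_arr → Spec_build in_arr (build in_arr)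

-- ===== LEMMAS AND PROOFS =====

theorem getD_set {α : Type} (l : List α) (n m : Nat) (a d : α) :
    (l.set n a).getD m d = if n = m ∧ n < l.length then a else l.getD m d := by
  simp only [List.getD_eq_getElem?_getD, List.getElem?_set]
  by_cases h : n = m
  · subst h
    by_cases h2 : n < l.length
    · simp [h2]
    · have hn : l[n]? = none := List.getElem?_eq_none (by omega)
      simp [h2]
  · simp [h]

theorem get2_set2 (t : Tbl) (r c : Nat) (v : Option Int) (r' c' : Nat) :
    get2 (set2 t r c v) r' c' =
      if r = r' ∧ r < t.length ∧ c = c' ∧ c < (t.getD r []).length then v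
      else get2 t r' c' := by
  unfold get2 set2
  rw [getD_set]
  by_cases h : r = r' ∧ r < t.length
  · obtain ⟨h1, h2⟩ := h
    subst h1
    rw [if_pos ⟨rfl, h2⟩, getD_set]
    by_cases h3 : c = c' ∧ c < (t.getD r []).length
    · rw [if_pos h3, if_pos ⟨rfl, h2, h3⟩]
    · rw [if_neg h3, if_neg (by tauto)]
  · rw [if_neg h, if_neg (by tauto)]

def Dims (rows cols : Nat) (t : Tbl) : Prop :=
  t.length = 2*rows ∧ ∀ r, r < 2*rows → (t.getD r []).length = 2*cols

theorem dims_set2 {rows cols : Nat} {t : Tbl} (h : Dims rows cols t) (r c : Nat) (v : Option Int) :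
    Dims rows cols (set2 t r c v) := by
  obtain ⟨h1, h2⟩ := h
  constructor
  · simp [set2, h1]
  · intro r' hr'
    unfold set2
    rw [getD_set]
    split_ifs with h3
    · obtain ⟨he, _⟩ := h3
      subst he
      rw [List.length_set]
      exact h2 r hr'
    · exact h2 r' hr'

theorem foldl_pres {α β : Type} {P : α → Prop} {f : α → β → α}
    (h : ∀ a b, P a → P (f a b)) : ∀ (l : List β) (a : α), P a → P (l.foldl f a) := by
  intro l
  induction l with
  | nil => intro a ha; exact ha
  | cons x xs ih => intro a ha; exact ih (f a x) (h a x ha)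

theorem revRange_succ (k : Nat) : revRange (k+1) = (k+1) :: revRange k := by
  simp [revRange, List.range_succ]

-- cellB's defining equations on each region
theorem cellB_zero (rows cols : Nat) (in_arr : List (List Int)) (r c : Nat)
    (h : r = 0 ∨ c = 0) : cellB rows cols in_arr r c = none := by
  rw [cellB]; simp [h]

theorem cellB_leaf (rows cols : Nat) (in_arr : List (List Int)) (r c : Nat)
    (hr0 : r ≠ 0) (hc0 : c ≠ 0) (hr : rows ≤ r) (hc : cols ≤ c) :
    cellB rows cols in_arr r c = some (aget in_arr (r - rows) (c - cols)) := by
  rw [cellB]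
  simp [hr0, hc0, hr, hc]

theorem cellB_hsum (rows cols : Nat) (in_arr : List (List Int)) (r c : Nat)
    (hr0 : r ≠ 0) (hc0 : c ≠ 0) (hr : rows ≤ r) (hc : c < cols) :
    cellB rows cols in_arr r c =
      addO (cellB rows cols in_arr r (2*c)) (cellB rows cols in_arr r (2*c+1)) := by
  rw [cellB]
  simp [hr0, hc0, hr, Nat.not_le.mpr hc]

theorem cellB_vsum (rows cols : Nat) (in_arr : List (List Int)) (r c : Nat)
    (hr0 : r ≠ 0) (hc0 : c ≠ 0) (hr : r < rows) :
    cellB rows cols in_arr r c =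
      addO (cellB rows cols in_arr (2*r) c) (cellB rows cols in_arr (2*r+1) c) := by
  rw [cellB]
  simp [hr0, hc0, Nat.not_le.mpr hr]

theorem dims_segStep1 {rows cols : Nat} {t : Tbl} (in_arr : List (List Int)) (ri : Nat)
    (ht : Dims rows cols t) : Dims rows cols (segStep1 in_arr rows cols ri t) := by
  unfold segStep1
  refine foldl_pres ?_ _ _ ht
  intro a b ha
  exact dims_set2 ha _ _ _

theorem dims_segStep2 {rows cols : Nat} {t : Tbl} (r : Nat)
    (ht : Dims rows cols t) : Dims rows cols (segStep2 cols r t) := by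
  unfold segStep2
  refine foldl_pres ?_ _ _ ht
  intro a b ha
  exact dims_set2 ha _ _ _

theorem dims_segStep3 {rows cols : Nat} {t : Tbl} (c : Nat)
    (ht : Dims rows cols t) : Dims rows cols (segStep3 rows c t) := by
  unfold segStep3
  refine foldl_pres ?_ _ _ ht
  intro a b ha
  exact dims_set2 ha _ _ _

theorem stage1_inner (in_arr : List (List Int)) (rows cols ri : Nat) (hri : ri < rows) :
    ∀ n, n ≤ cols → ∀ t : Tbl, Dims rows cols t → ∀ r' c',
      get2 ((List.range n).foldl
          (fun t ci => set2 t (rows + ri) (cols + ci) (some (aget in_arr ri ci))) t) r' c' =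
        if r' = rows + ri ∧ cols ≤ c' ∧ c' < cols + n then some (aget in_arr ri (c' - cols))
        else get2 t r' c' := by
  intro n
  induction n with
  | zero =>
    intro _ t ht r' c'
    rw [List.range_zero, List.foldl_nil, if_neg (by omega)]
  | succ n ih =>
    intro hn t ht r' c'
    rw [List.range_succ, List.foldl_append, List.foldl_cons, List.foldl_nil]
    have hF : Dims rows cols ((List.range n).foldl
        (fun t ci => set2 t (rows + ri) (cols + ci) (some (aget in_arr ri ci))) t) :=
      by refine foldl_pres ?_ _ _ ht; intro a b ha; exact dims_set2 ha _ _ _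
    rw [get2_set2, hF.1, hF.2 (rows + ri) (by omega), ih (by omega) t ht r' c']
    split_ifs with h1 h2 h3 <;>
      first
        | rfl
        | omega
        | (have hcc : c' - cols = n := by omega
           rw [hcc])

theorem segStep1_char (in_arr : List (List Int)) (rows cols ri : Nat) (hri : ri < rows)
    (t : Tbl) (ht : Dims rows cols t) (r' c' : Nat) :
    get2 (segStep1 in_arr rows cols ri t) r' c' =
      if r' = rows + ri ∧ cols ≤ c' ∧ c' < cols + cols then some (aget in_arr ri (c' - cols))
      else get2 t r' c' :=
  stage1_inner in_arr rows cols ri hri cols le_rfl t ht r' c'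

theorem stage1_outer (in_arr : List (List Int)) (rows cols : Nat) :
    ∀ n, n ≤ rows → ∀ t : Tbl, Dims rows cols t → ∀ r' c',
      get2 ((List.range n).foldl (fun t ri => segStep1 in_arr rows cols ri t) t) r' c' =
        if rows ≤ r' ∧ r' < rows + n ∧ cols ≤ c' ∧ c' < 2*cols then
          some (aget in_arr (r' - rows) (c' - cols))
        else get2 t r' c' := by
  intro n
  induction n with
  | zero =>
    intro _ t ht r' c'
    rw [List.range_zero, List.foldl_nil, if_neg (by omega)]
  | succ n ih =>
    intro hn t ht r' c'
    rw [List.range_succ, List.foldl_append, List.foldl_cons, List.foldl_nil]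
    have hF : Dims rows cols ((List.range n).foldl (fun t ri => segStep1 in_arr rows cols ri t) t) :=
      by refine foldl_pres ?_ _ _ ht; intro a b ha; exact dims_segStep1 in_arr b ha
    rw [segStep1_char in_arr rows cols n (by omega) _ hF r' c', ih (by omega) t ht r' c']
    split_ifs with h1 h2 h3 <;>
      first
        | rfl
        | omega
        | (have hcc : r' - rows = n := by omega
           rw [hcc])

theorem stage2_inner (in_arr : List (List Int)) (rows cols : Nat)
    (i : Nat) (hi : i < rows) :
    ∀ k, k ≤ cols - 1 → ∀ t : Tbl, Dims rows cols t →
      (∀ j, k < j → j < 2*cols → get2 t (rows+i) j = cellB rows cols in_arr (rows+i) j) →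
      ∀ r' c',
        get2 ((revRange k).foldl
            (fun t c => set2 t (rows+i) c (addO (get2 t (rows+i) (2*c)) (get2 t (rows+i) (2*c+1)))) t) r' c' =
          if r' = rows + i ∧ 1 ≤ c' ∧ c' ≤ k then cellB rows cols in_arr r' c'
          else get2 t r' c' := by
  intro k
  induction k with
  | zero =>
    intro _ t ht H r' c'
    rw [show revRange 0 = [] from rfl, List.foldl_nil, if_neg (by omega)]
  | succ k ih =>
    intro hk t ht H r' c'
    rw [revRange_succ, List.foldl_cons]
    have ht1 : Dims rows cols (set2 t (rows+i) (k+1)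
        (addO (get2 t (rows+i) (2*(k+1))) (get2 t (rows+i) (2*(k+1)+1)))) :=
      dims_set2 ht _ _ _
    have hval : get2 (set2 t (rows+i) (k+1)
        (addO (get2 t (rows+i) (2*(k+1))) (get2 t (rows+i) (2*(k+1)+1)))) (rows+i) (k+1) =
        cellB rows cols in_arr (rows+i) (k+1) := by
      rw [get2_set2,
        if_pos ⟨rfl, by rw [ht.1]; omega, rfl, by rw [ht.2 _ (by omega)]; omega⟩,
        H (2*(k+1)) (by omega) (by omega), H (2*(k+1)+1) (by omega) (by omega),
        cellB_hsum rows cols in_arr (rows+i) (k+1) (by omega) (by omega) (by omega) (by omega)]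
    have hother : ∀ a b, ¬(a = rows + i ∧ b = k+1) →
        get2 (set2 t (rows+i) (k+1)
          (addO (get2 t (rows+i) (2*(k+1))) (get2 t (rows+i) (2*(k+1)+1)))) a b = get2 t a b := by
      intro a b hab
      rw [get2_set2, if_neg (by tauto)]
    have H1 : ∀ j, k < j → j < 2*cols →
        get2 (set2 t (rows+i) (k+1)
          (addO (get2 t (rows+i) (2*(k+1))) (get2 t (rows+i) (2*(k+1)+1)))) (rows+i) j =
          cellB rows cols in_arr (rows+i) j := by
      intro j hj1 hj2
      by_cases hje : j = k+1
      · subst hje; exact hval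
      · rw [hother _ _ (by tauto)]
        exact H j (by omega) hj2
    rw [ih (by omega) _ ht1 H1 r' c']
    by_cases h1 : r' = rows + i ∧ 1 ≤ c' ∧ c' ≤ k
    · rw [if_pos h1, if_pos (by omega)]
    · rw [if_neg h1]
      by_cases h2 : r' = rows + i ∧ c' = k+1
      · obtain ⟨ha, hb⟩ := h2
        subst ha
        subst hb
        rw [if_pos (by omega)]
        exact hval
      · rw [hother _ _ h2, if_neg (by omega)]

theorem segStep2_char (in_arr : List (List Int)) (rows cols i : Nat) (hi : i < rows)
    (t : Tbl) (ht : Dims rows cols t)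
    (H : ∀ j, cols - 1 < j → j < 2*cols → get2 t (rows+i) j = cellB rows cols in_arr (rows+i) j)
    (r' c' : Nat) :
    get2 (segStep2 cols (rows+i) t) r' c' =
      if r' = rows + i ∧ 1 ≤ c' ∧ c' ≤ cols - 1 then cellB rows cols in_arr r' c'
      else get2 t r' c' :=
  stage2_inner in_arr rows cols i hi (cols - 1) le_rfl t ht H r' c'

theorem stage2_outer (in_arr : List (List Int)) (rows cols : Nat) :
    ∀ n, n ≤ rows → ∀ t : Tbl, Dims rows cols t →
      (∀ r' c', rows ≤ r' → r' < 2*rows → cols ≤ c' → c' < 2*cols →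
        get2 t r' c' = some (aget in_arr (r' - rows) (c' - cols))) →
      ∀ r' c',
        get2 ((List.range n).foldl (fun t i => segStep2 cols (rows + i) t) t) r' c' =
          if rows ≤ r' ∧ r' < rows + n ∧ 1 ≤ c' ∧ c' ≤ cols - 1 then
            cellB rows cols in_arr r' c'
          else get2 t r' c' := by
  intro n
  induction n with
  | zero =>
    intro _ t ht H r' c'
    rw [List.range_zero, List.foldl_nil, if_neg (by omega)]
  | succ n ih =>
    intro hn t ht H r' c'
    rw [List.range_succ, List.foldl_append, List.foldl_cons, List.foldl_nil]
    have hF : Dims rows cols ((List.range n).foldl (fun t i => segStep2 cols (rows + i) t) t) :=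
      by refine foldl_pres ?_ _ _ ht; intro a b ha; exact dims_segStep2 _ ha
    have Hinner : ∀ j, cols - 1 < j → j < 2*cols →
        get2 ((List.range n).foldl (fun t i => segStep2 cols (rows + i) t) t) (rows+n) j =
          cellB rows cols in_arr (rows+n) j := by
      intro j hj1 hj2
      rw [ih (by omega) t ht H (rows+n) j, if_neg (by omega),
        H (rows+n) j (by omega) (by omega) (by omega) (by omega),
        cellB_leaf rows cols in_arr (rows+n) j (by omega) (by omega) (by omega) (by omega)]
    rw [segStep2_char in_arr rows cols n (by omega) _ hF Hinner r' c', ih (by omega) t ht H r' c']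
    split_ifs <;> first | rfl | omega

theorem stage3_inner (in_arr : List (List Int)) (rows cols : Nat) (c : Nat) (hc : 1 ≤ c)
    (hc2 : c < 2*cols) :
    ∀ k, k ≤ rows - 1 → ∀ t : Tbl, Dims rows cols t →
      (∀ i, k < i → i < 2*rows → get2 t i c = cellB rows cols in_arr i c) →
      ∀ r' c',
        get2 ((revRange k).foldl
            (fun t r => set2 t r c (addO (get2 t (2*r) c) (get2 t (2*r+1) c))) t) r' c' =
          if c' = c ∧ 1 ≤ r' ∧ r' ≤ k then cellB rows cols in_arr r' c'
          else get2 t r' c' := by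
  intro k
  induction k with
  | zero =>
    intro _ t ht H r' c'
    rw [show revRange 0 = [] from rfl, List.foldl_nil, if_neg (by omega)]
  | succ k ih =>
    intro hk t ht H r' c'
    rw [revRange_succ, List.foldl_cons]
    have ht1 : Dims rows cols (set2 t (k+1) c
        (addO (get2 t (2*(k+1)) c) (get2 t (2*(k+1)+1) c))) :=
      dims_set2 ht _ _ _
    have hval : get2 (set2 t (k+1) c
        (addO (get2 t (2*(k+1)) c) (get2 t (2*(k+1)+1) c))) (k+1) c =
        cellB rows cols in_arr (k+1) c := by
      rw [get2_set2,
        if_pos ⟨rfl, by rw [ht.1]; omega, rfl, by rw [ht.2 _ (by omega)]; omega⟩,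
        H (2*(k+1)) (by omega) (by omega), H (2*(k+1)+1) (by omega) (by omega),
        cellB_vsum rows cols in_arr (k+1) c (by omega) (by omega) (by omega)]
    have hother : ∀ a b, ¬(a = k+1 ∧ b = c) →
        get2 (set2 t (k+1) c
          (addO (get2 t (2*(k+1)) c) (get2 t (2*(k+1)+1) c))) a b = get2 t a b := by
      intro a b hab
      rw [get2_set2, if_neg (by tauto)]
    have H1 : ∀ i, k < i → i < 2*rows →
        get2 (set2 t (k+1) c
          (addO (get2 t (2*(k+1)) c) (get2 t (2*(k+1)+1) c))) i c =
          cellB rows cols in_arr i c := by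
      intro i hi1 hi2
      by_cases hie : i = k+1
      · subst hie; exact hval
      · rw [hother _ _ (by tauto)]
        exact H i (by omega) hi2
    rw [ih (by omega) _ ht1 H1 r' c']
    by_cases h1 : c' = c ∧ 1 ≤ r' ∧ r' ≤ k
    · rw [if_pos h1, if_pos (by omega)]
    · rw [if_neg h1]
      by_cases h2 : r' = k+1 ∧ c' = c
      · obtain ⟨ha, hb⟩ := h2
        subst ha
        subst hb
        rw [if_pos (by omega)]
        exact hval
      · rw [hother _ _ h2, if_neg (by omega)]

theorem segStep3_char (in_arr : List (List Int)) (rows cols c : Nat) (hc : 1 ≤ c)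
    (hc2 : c < 2*cols) (t : Tbl) (ht : Dims rows cols t)
    (H : ∀ i, rows - 1 < i → i < 2*rows → get2 t i c = cellB rows cols in_arr i c)
    (r' c' : Nat) :
    get2 (segStep3 rows c t) r' c' =
      if c' = c ∧ 1 ≤ r' ∧ r' ≤ rows - 1 then cellB rows cols in_arr r' c'
      else get2 t r' c' :=
  stage3_inner in_arr rows cols c hc hc2 (rows - 1) le_rfl t ht H r' c'

theorem stage3_outer (in_arr : List (List Int)) (rows cols : Nat) :
    ∀ m, m ≤ 2*cols - 1 → ∀ t : Tbl, Dims rows cols t →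
      (∀ i c', rows ≤ i → i < 2*rows → c' < 2*cols → get2 t i c' = cellB rows cols in_arr i c') →
      ∀ r' c',
        get2 ((revRange m).foldl (fun t c => segStep3 rows c t) t) r' c' =
          if 1 ≤ r' ∧ r' < rows ∧ 1 ≤ c' ∧ c' ≤ m then cellB rows cols in_arr r' c'
          else get2 t r' c' := by
  intro m
  induction m with
  | zero =>
    intro _ t ht H r' c'
    rw [show revRange 0 = [] from rfl, List.foldl_nil, if_neg (by omega)]
  | succ m ih =>
    intro hm t ht H r' c'
    rw [revRange_succ, List.foldl_cons]
    have ht1 : Dims rows cols (segStep3 rows (m+1) t) := dims_segStep3 _ ht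
    have Hinner : ∀ i, rows - 1 < i → i < 2*rows →
        get2 t i (m+1) = cellB rows cols in_arr i (m+1) := by
      intro i hi1 hi2
      exact H i (m+1) (by omega) hi2 (by omega)
    have hstep := segStep3_char in_arr rows cols (m+1) (by omega) (by omega) t ht Hinner
    have H1 : ∀ i c', rows ≤ i → i < 2*rows → c' < 2*cols →
        get2 (segStep3 rows (m+1) t) i c' = cellB rows cols in_arr i c' := by
      intro i c' hi1 hi2 hc'
      rw [hstep i c', if_neg (by omega)]
      exact H i c' hi1 hi2 hc'
    rw [ih (by omega) _ ht1 H1 r' c']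
    by_cases h1 : 1 ≤ r' ∧ r' < rows ∧ 1 ≤ c' ∧ c' ≤ m
    · rw [if_pos h1, if_pos (by omega)]
    · rw [if_neg h1, hstep r' c']
      by_cases h2 : c' = m+1 ∧ 1 ≤ r' ∧ r' ≤ rows - 1
      · rw [if_pos h2, if_pos (by omega)]
      · rw [if_neg h2, if_neg (by omega)]

theorem dims_seg0 (rows cols : Nat) :
    Dims rows cols (List.replicate (rows*2) (List.replicate (cols*2) (none : Option Int))) := by
  constructor
  · rw [List.length_replicate]; omega
  · intro r hr
    rw [List.getD_eq_getElem _ _ (by rw [List.length_replicate]; omega), List.getElem_replicate,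
      List.length_replicate]
    omega

theorem get2_seg0 (rows cols r c : Nat) :
    get2 (List.replicate (rows*2) (List.replicate (cols*2) (none : Option Int))) r c = none := by
  unfold get2
  simp only [List.getD_eq_getElem?_getD, List.getElem?_replicate]
  split_ifs <;> simp

theorem get2_elem (t : Tbl) (r c : Nat) (h2 : c < (t.getD r []).length) :
    get2 t r c = (t.getD r [])[c] := by
  unfold get2
  rw [List.getD_eq_getElem _ _ h2]

theorem final_eq (in_arr : List (List Int)) (rows cols : Nat) :
    (revRange (cols*2 - 1)).foldl (fun t c => segStep3 rows c t)
      ((List.range rows).foldl (fun t i => segStep2 cols (rows + i) t)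
        ((List.range rows).foldl (fun t ri => segStep1 in_arr rows cols ri t)
          (List.replicate (rows*2) (List.replicate (cols*2) (none : Option Int)))))
    = (List.range (2*rows)).map (fun r => (List.range (2*cols)).map
        (fun c => cellB rows cols in_arr r c)) := by
  set seg0 : Tbl := List.replicate (rows*2) (List.replicate (cols*2) (none : Option Int)) with hseg0
  set seg1 : Tbl := (List.range rows).foldl (fun t ri => segStep1 in_arr rows cols ri t) seg0 with hseg1
  set seg2 : Tbl := (List.range rows).foldl (fun t i => segStep2 cols (rows + i) t) seg1 with hseg2
  set seg3 : Tbl := (revRange (cols*2 - 1)).foldl (fun t c => segStep3 rows c t) seg2 with hseg3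
  have hd0 : Dims rows cols seg0 := dims_seg0 rows cols
  have hd1 : Dims rows cols seg1 := by
    rw [hseg1]; refine foldl_pres ?_ _ _ hd0; intro a b ha; exact dims_segStep1 in_arr b ha
  have hd2 : Dims rows cols seg2 := by
    rw [hseg2]; refine foldl_pres ?_ _ _ hd1; intro a b ha; exact dims_segStep2 _ ha
  have hd3 : Dims rows cols seg3 := by
    rw [hseg3]; refine foldl_pres ?_ _ _ hd2; intro a b ha; exact dims_segStep3 _ ha
  have h1 : ∀ r' c', get2 seg1 r' c' =
      if rows ≤ r' ∧ r' < rows + rows ∧ cols ≤ c' ∧ c' < 2*cols then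
        some (aget in_arr (r' - rows) (c' - cols))
      else none := by
    intro r' c'
    rw [hseg1, stage1_outer in_arr rows cols rows le_rfl seg0 hd0 r' c', hseg0, get2_seg0]
  have h2 : ∀ r' c', get2 seg2 r' c' =
      if rows ≤ r' ∧ r' < rows + rows ∧ 1 ≤ c' ∧ c' ≤ cols - 1 then
        cellB rows cols in_arr r' c'
      else get2 seg1 r' c' := by
    intro r' c'
    rw [hseg2, stage2_outer in_arr rows cols rows le_rfl seg1 hd1 ?_ r' c']
    intro a b ha1 ha2 hb1 hb2
    rw [h1 a b, if_pos (by omega)]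
  have H3 : ∀ i c', rows ≤ i → i < 2*rows → c' < 2*cols →
      get2 seg2 i c' = cellB rows cols in_arr i c' := by
    intro i c' hi1 hi2 hc'
    rw [h2 i c']
    by_cases hA : 1 ≤ c' ∧ c' ≤ cols - 1
    · rw [if_pos (by omega)]
    · rw [if_neg (by omega), h1 i c']
      by_cases hB : cols ≤ c'
      · rw [if_pos (by omega),
          cellB_leaf rows cols in_arr i c' (by omega) (by omega) (by omega) (by omega)]
      · rw [if_neg (by omega), cellB_zero rows cols in_arr i c' (by omega)]
  have h3 : ∀ r' c', get2 seg3 r' c' =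
      if 1 ≤ r' ∧ r' < rows ∧ 1 ≤ c' ∧ c' ≤ cols*2 - 1 then cellB rows cols in_arr r' c'
      else get2 seg2 r' c' := by
    intro r' c'
    rw [hseg3, stage3_outer in_arr rows cols (cols*2 - 1) (by omega) seg2 hd2 H3 r' c']
  have hpoint : ∀ r', r' < 2*rows → ∀ c', c' < 2*cols →
      get2 seg3 r' c' = cellB rows cols in_arr r' c' := by
    intro r' hr' c' hc'
    rw [h3 r' c']
    by_cases hA : 1 ≤ r' ∧ r' < rows ∧ 1 ≤ c' ∧ c' ≤ cols*2 - 1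
    · rw [if_pos hA]
    · rw [if_neg hA]
      by_cases hB : rows ≤ r'
      · exact H3 r' c' hB hr' hc'
      · rw [h2 r' c', if_neg (by omega), h1 r' c', if_neg (by omega),
          cellB_zero rows cols in_arr r' c' (by omega)]
  apply List.ext_getElem
  · rw [hd3.1, List.length_map, List.length_range]
  · intro r hr1 hr2
    have hrlt : r < 2*rows := by rw [hd3.1] at hr1; exact hr1
    have hrow : seg3[r] = seg3.getD r [] := (List.getD_eq_getElem _ _ hr1).symm
    rw [List.getElem_map, List.getElem_range]
    apply List.ext_getElem
    · rw [hrow, hd3.2 r hrlt, List.length_map, List.length_range]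
    · intro c hc1 hc2
      have hclt : c < 2*cols := by
        rw [hrow, hd3.2 r hrlt] at hc1; exact hc1
      rw [List.getElem_map, List.getElem_range]
      have := hpoint r hrlt c hclt
      rw [get2_elem seg3 r c (by rw [← hrow]; exact hc1)] at this
      rw [← this]
      congr 1

-- ===== VERDICT (by name: the statement is the Claim_ definition above) =====
theorem build_spec : Claim_equal_build := by
  intro in_arr _ _
  show build in_arr = build_alt in_arr
  exact final_eq in_arr in_arr.length (in_arr.headD []).length
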